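-- pv_equiv track=rewrite | github.com/hackingmath/puzzles | puzzle_1_to_9_shapes1918.py | calc_quadrant
-- ===== SOURCE A (Python) =====
-- def calc_quadrant(n):
--     '''Calculates which quadrant the given cell is in'''
--     quads = [[0,1,2,9,10,11,18,19,20],
--              [3,4,5,12,13,14,21,22,23],
--              [6,7,8,15,16,17,24,25,26],
--              [27,28,29,36,37,38,45,46,47],
--              [30,31,32,39,40,41,48,49,50],
--              [33,34,35,42,43,44,51,52,53],
--              [54,55,56,63,64,65,72,73,74],
--              [57,58,59,66,67,68,75,76,77],
--              [60,61,62,69,70,71,78,79,80]]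
--     for q in range(9):
--         if n in quads[q]:
--             return q
-- ===== SOURCE B (Python) =====
-- def calc_quadrant(n):
--     '''Calculates which quadrant the given cell is in'''
--     if n in range(81):
--         return int((n // 27) * 3 + (n % 9) // 3)
-- ===== Notes on version B (the rewrite author's own statement) =====
-- stated objective: simpler
-- what changed: Replaced the hard-coded 9x9 quadrant table with a linear membership scan by a closed-form arithmetic formula (n//27)*3 + (n%9)//3 behind a single range guard.
import Mathlib
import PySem

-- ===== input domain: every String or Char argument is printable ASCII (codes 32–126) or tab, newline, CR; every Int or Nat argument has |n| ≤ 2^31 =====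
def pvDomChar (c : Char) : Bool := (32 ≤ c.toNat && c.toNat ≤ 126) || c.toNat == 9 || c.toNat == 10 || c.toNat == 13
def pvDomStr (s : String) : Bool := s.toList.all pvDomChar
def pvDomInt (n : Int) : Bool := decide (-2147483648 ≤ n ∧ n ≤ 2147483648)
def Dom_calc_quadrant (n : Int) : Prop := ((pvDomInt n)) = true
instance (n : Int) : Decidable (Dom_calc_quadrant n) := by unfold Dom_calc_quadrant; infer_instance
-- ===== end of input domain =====

-- B replaces A's 9x9 quadrant table and linear scan with a closed-form arithmetic formula (simpler).
-- ===== PORT A =====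
-- loop `for q in range(9): if n in quads[q]: return q` as structural recursion over the table
def pvCalcLoop (n : Int) (q : Int) (rest : List (List Int)) : Option Int :=
  match rest with
  | [] => none
  | l :: t => if n ∈ l then some q else pvCalcLoop n (q + 1) t

def calc_quadrant (n : Int) : Option Int :=
  let quads : List (List Int) :=
    [[0,1,2,9,10,11,18,19,20],
     [3,4,5,12,13,14,21,22,23],
     [6,7,8,15,16,17,24,25,26],
     [27,28,29,36,37,38,45,46,47],
     [30,31,32,39,40,41,48,49,50],
     [33,34,35,42,43,44,51,52,53],
     [54,55,56,63,64,65,72,73,74],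
     [57,58,59,66,67,68,75,76,77],
     [60,61,62,69,70,71,78,79,80]]
  pvCalcLoop n 0 quads

-- ===== PORT B =====
def calc_quadrant_alt (n : Int) : Option Int :=
  if 0 ≤ n ∧ n < 81 then
    some (PySem.Int.floordiv n 27 * 3 + PySem.Int.floordiv (PySem.Int.mod n 9) 3)
  else none

-- ===== PRECONDITION & SPEC =====
def Spec_calc_quadrant (n : Int) (out : Option Int) : Prop := out = calc_quadrant_alt n
instance (n : Int) (out : Option Int) : Decidable (Spec_calc_quadrant n out) := by unfold Spec_calc_quadrant; infer_instance

-- ===== CLAIM (what is proved, stated in full; the proofs are below) =====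
def Claim_equal_calc_quadrant : Prop := ∀ (n : Int), Dom_calc_quadrant n → Spec_calc_quadrant n (calc_quadrant n)

-- ===== LEMMAS AND PROOFS =====

-- ===== VERDICT (by name: the statement is the Claim_ definition above) =====
theorem calc_quadrant_spec : Claim_equal_calc_quadrant := by
  intro n _
  unfold Spec_calc_quadrant
  by_cases h : 0 ≤ n ∧ n < 81
  · obtain ⟨h0, h1⟩ := h
    interval_cases n <;> decide
  · have hA : calc_quadrant n = none := by
      simp only [calc_quadrant, pvCalcLoop, List.mem_cons, List.not_mem_nil]
      split_ifs <;>
        first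
          | rfl
          | (exfalso; rcases ‹_ ∨ _› with h|h|h|h|h|h|h|h|h|h <;> omega)
    have hB : calc_quadrant_alt n = none := by
      simp only [calc_quadrant_alt, if_neg h]
    rw [hA, hB]
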